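-- pv_equiv track=rewrite | github.com/priyushasunkara/Language-Modeling | language.py | countStartWords
-- ===== SOURCE A (Python) =====
-- def countStartWords(corpus):
--     dict1={}
--     for i in corpus:
--         if i[0] in dict1:
--             dict1[i[0]] = dict1[i[0]] + 1
--         else:
--             dict1[i[0]]=1
--     return dict1
-- ===== SOURCE B (Python) =====
-- def countStartWords(corpus):
--     firsts = [i[0] for i in corpus]
--     return {w: firsts.count(w) for w in dict.fromkeys(firsts)}
-- ===== Notes on version B (the rewrite author's own statement) =====
-- stated objective: simpler
-- what changed: Replaces the incremental if-in-dict counting loop by extracting the first words once, deduplicating them in first-occurrence order (dict.fromkeys) and counting each distinct word with list.count in a dict comprehension.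
import Mathlib
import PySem

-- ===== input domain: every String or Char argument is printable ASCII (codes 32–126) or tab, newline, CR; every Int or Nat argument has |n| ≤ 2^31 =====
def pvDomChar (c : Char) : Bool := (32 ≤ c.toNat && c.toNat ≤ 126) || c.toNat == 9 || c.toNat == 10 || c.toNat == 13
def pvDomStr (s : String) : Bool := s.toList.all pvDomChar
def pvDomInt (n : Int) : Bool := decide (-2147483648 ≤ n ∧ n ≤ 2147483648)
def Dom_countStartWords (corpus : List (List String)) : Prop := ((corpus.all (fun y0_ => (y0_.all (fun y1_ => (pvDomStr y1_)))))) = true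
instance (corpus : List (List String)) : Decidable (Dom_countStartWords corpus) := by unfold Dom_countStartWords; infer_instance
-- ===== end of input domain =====

-- B replaces A's incremental if-in-dict counting loop by one pass extracting first words,
-- an ordered dedup, and a per-key count (simpler decomposition, not faster).


-- ===== PORT A =====
def countStartWords (corpus : List (List String)) : List (String × Int) :=
  (corpus.foldl (fun d i =>
      let k := (PySem.List.pyGet? i 0).getD ""
      if d.contains k then d.insert k (d.getD k 0 + 1) else d.insert k 1)
    PySem.Dict.empty).items

-- ===== PORT B =====
def countStartWords_alt (corpus : List (List String)) : List (String × Int) :=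
  let firsts := corpus.map (fun i => (PySem.List.pyGet? i 0).getD "")
  (PySem.List.dedup firsts).map (fun w => (w, (firsts.count w : Int)))

-- ===== PRECONDITION & SPEC =====
-- Pre_ excludes corpora containing an empty sentence: there Python A raises IndexError on i[0].
def Pre_countStartWords (corpus : List (List String)) : Prop :=
  ∀ i ∈ corpus, i ≠ []
instance (corpus : List (List String)) : Decidable (Pre_countStartWords corpus) := by unfold Pre_countStartWords; infer_instance

def pvWitness_countStartWords : List (List String) := [["the", "cat"], ["a", "dog"], ["the", "end"]]

def Spec_countStartWords (corpus : List (List String)) (out : List (String × Int)) : Prop := out = countStartWords_alt corpus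
instance (corpus : List (List String)) (out : List (String × Int)) : Decidable (Spec_countStartWords corpus out) := by unfold Spec_countStartWords; infer_instance

-- ===== CLAIM (what is proved, stated in full; the proofs are below) =====
def Claim_equal_countStartWords : Prop := ∀ (corpus : List (List String)), Dom_countStartWords corpus → Pre_countStartWords corpus → Spec_countStartWords corpus (countStartWords corpus)

-- ===== LEMMAS AND PROOFS =====

-- A's branching update is the standard counter insert step.
lemma countStep_eq (d : PySem.Dict String Int) (k : String) :
    (if d.contains k then d.insert k (d.getD k 0 + 1) else d.insert k 1)
      = d.insert k (d.getD k 0 + 1) := by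
  by_cases h : d.contains k = true
  · simp [h]
  · simp only [Bool.not_eq_true] at h
    rw [if_neg (by simp [h]), PySem.Dict.getD_of_not_contains d 0 h]
    norm_num

-- A fold keyed through a map of the list equals the fold over the mapped list.
lemma fold_map_key (key : List String → String) (l : List (List String)) (d : PySem.Dict String Int) :
    l.foldl (fun d i => d.insert (key i) (d.getD (key i) 0 + 1)) d
      = (l.map key).foldl (fun d x => d.insert x (d.getD x 0 + 1)) d := by
  induction l generalizing d with
  | nil => rfl
  | cons a t ih => simp [ih]

-- ===== VERDICT (by name: the statement is the Claim_ definition above) =====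
theorem countStartWords_spec : Claim_equal_countStartWords := by
  intro corpus _ _
  unfold Spec_countStartWords countStartWords countStartWords_alt
  simp only [countStep_eq]
  rw [fold_map_key (fun i => (PySem.List.pyGet? i 0).getD ""),
    PySem.Dict.foldl_insert_getD_add_one_eq_counter, PySem.Dict.items_counter]
  simp [PySem.List.dedup_eq_ofList]
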